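-- pv_equiv track=rewrite | github.com/jazyan/d3_force_graph | calc_graph_iso.py | get_no_isomorphisms_list
-- ===== SOURCE A (Python) =====
-- def get_no_isomorphisms_list(graph_candidates, perm):
--     no_iso_list = []
--     seen = set()
--     for graph in graph_candidates:
--         # if we've seen this candidate before, then don't process
--         if graph in seen:
--             continue
--         # otherwise, process this graph with permutation function
--         no_iso_list.append(graph)
--         seen |= generate_graph_perms(graph, perm)
--     return sorted(no_iso_list, key=len)
--
-- def generate_graph_perms(graph, perm):
--     graph_perm = set()
--     for p in perm:
--         # we sort everything because the edges are undirected
--         # we don't want to distinguish between [0, 1] and [1, 0]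
--         # use tuples because we want to put them in a set and tuples are hashable
--         new_graph = [tuple(sorted([p[e] for e in elt])) for elt in graph]
--         new_graph = tuple(sorted(new_graph))
--         graph_perm.add(new_graph)
--     return graph_perm
-- ===== SOURCE B (Python) =====
-- def _image(p, h):
--     # permutation image of graph h under p, in A's double-sorted tuple convention
--     return tuple(sorted(tuple(sorted(p[e] for e in elt)) for elt in h))
--
-- def get_no_isomorphisms_list(graph_candidates, perm):
--     kept = []
--     for g in graph_candidates:
--         if all(g != _image(p, h) for h in kept for p in perm):
--             kept.append(g)
--     return sorted(kept, key=len)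
-- ===== Notes on version B (the rewrite author's own statement) =====
-- stated objective: alternative
-- what changed: A marks whole permutation orbits in a running 'seen' set and skips members; B keeps no set and instead tests each candidate directly against the permutation images of the already-kept representatives, recomputing images on the fly.
-- outside the precondition, e.g. on get_no_isomorphisms_list([((0,),), ((7,),)], [[7]]): A returns [((0,),)], B returns [((0,),)]
import Mathlib
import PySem

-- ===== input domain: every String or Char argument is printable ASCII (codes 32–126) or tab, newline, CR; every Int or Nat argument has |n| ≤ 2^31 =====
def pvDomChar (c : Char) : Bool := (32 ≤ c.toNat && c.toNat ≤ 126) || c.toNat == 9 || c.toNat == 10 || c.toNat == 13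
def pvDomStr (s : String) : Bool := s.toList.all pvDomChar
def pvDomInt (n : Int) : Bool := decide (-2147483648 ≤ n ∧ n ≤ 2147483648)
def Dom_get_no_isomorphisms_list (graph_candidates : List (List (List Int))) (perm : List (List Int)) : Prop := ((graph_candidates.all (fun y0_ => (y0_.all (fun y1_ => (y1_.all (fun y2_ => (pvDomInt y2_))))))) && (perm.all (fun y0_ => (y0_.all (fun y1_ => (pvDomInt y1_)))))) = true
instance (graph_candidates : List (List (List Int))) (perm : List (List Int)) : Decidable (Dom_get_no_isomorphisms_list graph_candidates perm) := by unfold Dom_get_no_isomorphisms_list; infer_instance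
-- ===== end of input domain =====

-- B replaces A's running set of all permutation images ("seen") by a direct scan: a
-- candidate is kept iff it equals no permutation image of an already-kept graph
-- (objective: alternative — no auxiliary set, at the price of recomputing images).

-- ===== PORT A =====
-- tuple(sorted([p[e] for e in elt]))  (p[e] is total here; Pre_ excludes the IndexError inputs)
def pvEdgeA (p : List Int) (elt : List Int) : List Int :=
  PySem.List.sorted (elt.map (fun e => (PySem.List.pyGet? p e).getD 0)) (fun x => x) false

-- new_graph = tuple(sorted([... for elt in graph]))
def pvNewGraphA (p : List Int) (graph : List (List Int)) : List (List Int) :=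
  PySem.List.sorted (graph.map (pvEdgeA p)) (fun x => x) false

-- generate_graph_perms(graph, perm)
def generate_graph_perms (graph : List (List Int)) (perm : List (List Int)) : PySem.Set (List (List Int)) :=
  perm.foldl (fun s p => PySem.Set.add s (pvNewGraphA p graph)) PySem.Set.empty

def get_no_isomorphisms_list (graph_candidates : List (List (List Int))) (perm : List (List Int)) : List (List (List Int)) :=
  let st := graph_candidates.foldl
    (fun (st : List (List (List Int)) × PySem.Set (List (List Int))) graph =>
      if PySem.Set.contains st.2 graph then st
      else (st.1 ++ [graph], PySem.Set.union st.2 (generate_graph_perms graph perm)))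
    ([], PySem.Set.empty)
  PySem.List.sorted st.1 (fun g => g.length) false

-- ===== PORT B =====
-- _image(p, h) from Source B
def pvImageB (p : List Int) (h : List (List Int)) : List (List Int) :=
  PySem.List.sorted
    (h.map (fun elt => PySem.List.sorted (elt.map (fun e => (PySem.List.pyGet? p e).getD 0)) (fun x => x) false))
    (fun x => x) false

def get_no_isomorphisms_list_alt (graph_candidates : List (List (List Int))) (perm : List (List Int)) : List (List (List Int)) :=
  let kept := graph_candidates.foldl
    (fun (kept : List (List (List Int))) g =>
      if kept.all (fun h => perm.all (fun p => !(g == pvImageB p h))) then kept ++ [g] else kept)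
    []
  PySem.List.sorted kept (fun g => g.length) false

-- ===== PRECONDITION & SPEC =====
-- Pre_ excludes the inputs where some node index e of some candidate is out of range for some
-- p in perm: there the Python A raises IndexError — except in the rare case that the offending
-- candidate is skipped because it was already seen, where A still returns (see claim cites).
def Pre_get_no_isomorphisms_list (graph_candidates : List (List (List Int))) (perm : List (List Int)) : Prop :=
  ∀ g ∈ graph_candidates, ∀ elt ∈ g, ∀ e ∈ elt, ∀ p ∈ perm, (PySem.List.pyGet? p e).isSome
instance (graph_candidates : List (List (List Int))) (perm : List (List Int)) : Decidable (Pre_get_no_isomorphisms_list graph_candidates perm) := by unfold Pre_get_no_isomorphisms_list; infer_instance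
def pvWitness_get_no_isomorphisms_list : List (List (List Int)) × List (List Int) :=
  ([[[0, 1]], [[1, 0]], [[0, 1], [0, 1]]], [[0, 1], [1, 0]])
def Spec_get_no_isomorphisms_list (graph_candidates : List (List (List Int))) (perm : List (List Int)) (out : List (List (List Int))) : Prop := out = get_no_isomorphisms_list_alt graph_candidates perm
instance (graph_candidates : List (List (List Int))) (perm : List (List Int)) (out : List (List (List Int))) : Decidable (Spec_get_no_isomorphisms_list graph_candidates perm out) := by unfold Spec_get_no_isomorphisms_list; infer_instance

-- ===== CLAIM (what is proved, stated in full; the proofs are below) =====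
def Claim_equal_get_no_isomorphisms_list : Prop := ∀ (graph_candidates : List (List (List Int))) (perm : List (List Int)), Dom_get_no_isomorphisms_list graph_candidates perm → Pre_get_no_isomorphisms_list graph_candidates perm → Spec_get_no_isomorphisms_list graph_candidates perm (get_no_isomorphisms_list graph_candidates perm)

-- ===== LEMMAS AND PROOFS =====

-- the two image helpers are the same function
theorem pvImageB_eq_newGraphA : pvImageB = pvNewGraphA := rfl

-- membership in generate_graph_perms
theorem mem_generate_graph_perms (graph : List (List Int)) (perm : List (List Int)) (x : List (List Int)) :
    x ∈ generate_graph_perms graph perm ↔ ∃ p ∈ perm, x = pvNewGraphA p graph := by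
  unfold generate_graph_perms
  rw [PySem.Set.mem_foldl_add]
  simp [PySem.Set.empty]

-- B's keep-test is true iff g is no image of a kept graph
theorem alt_test_iff (kept : List (List (List Int))) (perm : List (List Int)) (g : List (List Int)) :
    (kept.all (fun h => perm.all (fun p => !(g == pvImageB p h))) = true)
      ↔ ¬ ∃ h ∈ kept, ∃ p ∈ perm, g = pvNewGraphA p h := by
  simp [List.all_eq_true, pvImageB_eq_newGraphA]

-- main loop invariant: if "seen" holds exactly the images of the kept graphs, the two loops keep the same list
theorem loop_eq (perm : List (List Int)) :
    ∀ (cands : List (List (List Int))) (kept : List (List (List Int))) (seen : PySem.Set (List (List Int))),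
    (∀ x, x ∈ seen ↔ ∃ h ∈ kept, ∃ p ∈ perm, x = pvNewGraphA p h) →
    (cands.foldl
      (fun (st : List (List (List Int)) × PySem.Set (List (List Int))) graph =>
        if PySem.Set.contains st.2 graph then st
        else (st.1 ++ [graph], PySem.Set.union st.2 (generate_graph_perms graph perm)))
      (kept, seen)).1
    = cands.foldl
      (fun (k : List (List (List Int))) g =>
        if k.all (fun h => perm.all (fun p => !(g == pvImageB p h))) then k ++ [g] else k)
      kept := by
  intro cands
  induction cands with
  | nil => intro kept seen _; rfl
  | cons g cs ih =>
    intro kept seen hinv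
    simp only [List.foldl_cons]
    by_cases hg : g ∈ seen
    · rw [if_pos ((PySem.Set.contains_iff _ _).mpr hg), if_neg]
      · exact ih kept seen hinv
      · rw [alt_test_iff]; exact fun hn => hn ((hinv g).mp hg)
    · rw [if_neg (fun hc => hg ((PySem.Set.contains_iff _ _).mp hc)),
        if_pos ((alt_test_iff kept perm g).mpr (fun hn => hg ((hinv g).mpr hn)))]
      apply ih
      intro x
      rw [PySem.Set.mem_union, hinv x, mem_generate_graph_perms]
      constructor
      · rintro (⟨h, hh, hp⟩ | hp)
        · exact ⟨h, List.mem_append_left _ hh, hp⟩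
        · exact ⟨g, List.mem_append_right _ (by simp), hp⟩
      · rintro ⟨h, hh, hp⟩
        rcases List.mem_append.mp hh with hh | hh
        · exact Or.inl ⟨h, hh, hp⟩
        · simp at hh; subst hh; exact Or.inr hp

-- ===== VERDICT (by name: the statement is the Claim_ definition above) =====
theorem get_no_isomorphisms_list_spec : Claim_equal_get_no_isomorphisms_list := by
  intro graph_candidates perm _ _
  unfold Spec_get_no_isomorphisms_list get_no_isomorphisms_list get_no_isomorphisms_list_alt
  have h := loop_eq perm graph_candidates [] PySem.Set.empty (by simp [PySem.Set.empty])
  simp only [h]
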